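-- pv_equiv track=rewrite | github.com/Karloar/MyGraduationProject | activation_force.py | get_ij_frequency_and_dist_from_word_list
-- ===== SOURCE A (Python) =====
-- def get_word_index_list(word, word_list):
--     '''
--     从列表中找到某个词的所有索引
--     '''
--     idx_list = []
--     begin = 0
--     while True:
--         try:
--             idx_list.append(word_list.index(word, begin))
--             begin = idx_list[-1] + 1
--         except ValueError:
--             break
--     return idx_list
--
-- def get_ij_frequency_and_dist_from_word_list(word_i, word_j, word_list, min_dis):
--     '''
--     根据一个句子的词列表, 计算单词i与单词j在某个距离内的共现词频、距离和、出现次数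
--     '''
--     word_i_idx_list = get_word_index_list(word_i, word_list)
--     word_j_idx_list = get_word_index_list(word_j, word_list)
--     if not word_i_idx_list or not word_j_idx_list:
--         return 0, 0, 0
--     ij_frequency = 0
--     ij_dist = 0
--     count = 0
--     i_idx = 0
--     j_idx = 0
--     # ==============================
--     # 这里需要修改
--     # ==============================
--     while i_idx < len(word_i_idx_list) and j_idx < len(word_j_idx_list):
--         if word_i_idx_list[i_idx] > word_j_idx_list[j_idx]:
--             j_idx += 1
--         else:
--             ij_frequency += 1
--             ij_dist += word_j_idx_list[j_idx] - word_i_idx_list[i_idx]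
--             count += 1
--             i_idx += 1
--     return ij_frequency, ij_dist, count
-- ===== SOURCE B (Python) =====
-- def get_ij_frequency_and_dist_from_word_list(word_i, word_j, word_list, min_dis):
--     '''
--     Single pass: maintain the count and position-sum of word_i occurrences not
--     yet matched to a word_j; flush them onto each word_j occurrence.
--     '''
--     freq = dist = count = 0
--     pending_count = pending_sum = 0
--     for pos, word in enumerate(word_list):
--         if word == word_i:
--             pending_count += 1
--             pending_sum += pos
--         if word == word_j:
--             freq += pending_count
--             dist += pending_count * pos - pending_sum
--             count += pending_count
--             pending_count = 0
--             pending_sum = 0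
--     return freq, dist, count
-- ===== Notes on version B (the rewrite author's own statement) =====
-- stated objective: simpler
-- what changed: Replaces A's construction of two index lists plus a two-pointer merge with a single pass over the word list that carries the count and position-sum of word_i occurrences not yet matched and flushes them onto each word_j occurrence.
import Mathlib
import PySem

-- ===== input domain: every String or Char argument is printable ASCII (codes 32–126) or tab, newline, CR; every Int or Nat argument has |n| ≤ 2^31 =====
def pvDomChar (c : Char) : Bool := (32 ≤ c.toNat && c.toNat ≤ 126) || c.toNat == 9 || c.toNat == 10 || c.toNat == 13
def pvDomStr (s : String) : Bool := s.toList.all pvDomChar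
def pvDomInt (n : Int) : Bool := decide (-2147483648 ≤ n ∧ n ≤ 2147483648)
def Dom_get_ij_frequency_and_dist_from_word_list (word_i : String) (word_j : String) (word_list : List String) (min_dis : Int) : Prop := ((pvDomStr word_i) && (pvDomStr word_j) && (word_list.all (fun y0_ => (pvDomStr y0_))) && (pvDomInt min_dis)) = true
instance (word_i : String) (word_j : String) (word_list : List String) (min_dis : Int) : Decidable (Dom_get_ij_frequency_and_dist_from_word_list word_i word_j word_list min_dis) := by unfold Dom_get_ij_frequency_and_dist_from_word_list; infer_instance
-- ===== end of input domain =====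

-- B replaces A's two index-list constructions and two-pointer merge by one pass that
-- carries the count/position-sum of pending word_i occurrences (objective: simpler).
-- min_dis is unused by A and hence by B.

-- ===== PORT A =====

-- exact port of Python list.index(word, begin): scan xs[begin:], absolute index, none = ValueError
def pvIndexFromAux (w : String) : List String → Nat → Option Nat
  | [], _ => none
  | x :: xs, k => if x = w then some k else pvIndexFromAux w xs (k + 1)

def pvIndexFrom (w : String) (xs : List String) (b : Nat) : Option Nat :=
  pvIndexFromAux w (xs.drop b) b

theorem pvIndexFromAux_bounds (w : String) (ys : List String) (k i : Nat)
    (h : pvIndexFromAux w ys k = some i) : k ≤ i ∧ i < k + ys.length := by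
  induction ys generalizing k with
  | nil => simp [pvIndexFromAux] at h
  | cons x xs ih =>
    simp only [pvIndexFromAux] at h
    split at h
    · cases h; simp only [List.length_cons]; omega
    · have := ih (k + 1) h; simp only [List.length_cons]; omega

theorem pvIndexFrom_bounds (w : String) (xs : List String) (b i : Nat)
    (h : pvIndexFrom w xs b = some i) : b ≤ i ∧ i < xs.length := by
  have := pvIndexFromAux_bounds w (xs.drop b) b i h
  have hl := List.length_drop (l := xs) (i := b)
  omega

-- the 'while True: idx_list.append(word_list.index(word, begin)); begin = idx+1' loop
def gwilLoop (w : String) (xs : List String) (b : Nat) : List Int :=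
  match h : pvIndexFrom w xs b with
  | none => []
  | some i => (i : Int) :: gwilLoop w xs (i + 1)
termination_by xs.length - b
decreasing_by
  have := pvIndexFrom_bounds w xs b i h; omega

def get_word_index_list (w : String) (xs : List String) : List Int := gwilLoop w xs 0

-- the two-pointer merge loop of A, with its accumulators
def amerge (I J : List Int) (f d c : Int) (ii jj : Nat) : Int × Int × Int :=
  if h : ii < I.length ∧ jj < J.length then
    if I.getD ii 0 > J.getD jj 0 then
      amerge I J f d c ii (jj + 1)
    else
      amerge I J (f + 1) (d + (J.getD jj 0 - I.getD ii 0)) (c + 1) (ii + 1) jj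
  else (f, d, c)
termination_by (I.length - ii) + (J.length - jj)
decreasing_by all_goals omega

def get_ij_frequency_and_dist_from_word_list (word_i : String) (word_j : String) (word_list : List String) (min_dis : Int) : Int × Int × Int :=
  let I := get_word_index_list word_i word_list
  let J := get_word_index_list word_j word_list
  if I = [] ∨ J = [] then (0, 0, 0)
  else amerge I J 0 0 0 0 0

-- ===== PORT B =====

-- the single 'for pos, word in enumerate(word_list)' loop of Source B
def bloop (wi wj : String) : List String → Int → Int → Int → Int → Int → Int → Int × Int × Int
  | [], _, f, d, c, _, _ => (f, d, c)
  | w :: ws, k, f, d, c, pc, ps =>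
    let pc1 := if w = wi then pc + 1 else pc
    let ps1 := if w = wi then ps + k else ps
    if w = wj then
      bloop wi wj ws (k + 1) (f + pc1) (d + (pc1 * k - ps1)) (c + pc1) 0 0
    else
      bloop wi wj ws (k + 1) f d c pc1 ps1

def get_ij_frequency_and_dist_from_word_list_alt (word_i : String) (word_j : String) (word_list : List String) (min_dis : Int) : Int × Int × Int :=
  bloop word_i word_j word_list 0 0 0 0 0 0

-- ===== PRECONDITION & SPEC =====
def Spec_get_ij_frequency_and_dist_from_word_list (word_i : String) (word_j : String) (word_list : List String) (min_dis : Int) (out : Int × Int × Int) : Prop := out = get_ij_frequency_and_dist_from_word_list_alt word_i word_j word_list min_dis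
instance (word_i : String) (word_j : String) (word_list : List String) (min_dis : Int) (out : Int × Int × Int) : Decidable (Spec_get_ij_frequency_and_dist_from_word_list word_i word_j word_list min_dis out) := by unfold Spec_get_ij_frequency_and_dist_from_word_list; infer_instance

-- ===== CLAIM (what is proved, stated in full; the proofs are below) =====
def Claim_equal_get_ij_frequency_and_dist_from_word_list : Prop := ∀ (word_i : String) (word_j : String) (word_list : List String) (min_dis : Int), Dom_get_ij_frequency_and_dist_from_word_list word_i word_j word_list min_dis → Spec_get_ij_frequency_and_dist_from_word_list word_i word_j word_list min_dis (get_ij_frequency_and_dist_from_word_list word_i word_j word_list min_dis)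

-- ===== LEMMAS AND PROOFS =====

-- triple addition
def add3 (a b : Int × Int × Int) : Int × Int × Int := (a.1 + b.1, a.2.1 + b.2.1, a.2.2 + b.2.2)

-- reference merge of two sorted index lists
def mrg : List Int → List Int → Int × Int × Int
  | _, [] => (0, 0, 0)
  | [], _ :: _ => (0, 0, 0)
  | i :: is, j :: js =>
    if i > j then mrg (i :: is) js
    else add3 (1, j - i, 1) (mrg is (j :: js))
termination_by I J => I.length + J.length

-- indices ≥ k of w in the suffix ys of the word list starting at absolute position k
def idxsFrom (w : String) : List String → Nat → List Int
  | [], _ => []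
  | x :: xs, k => if x = w then (k : Int) :: idxsFrom w xs (k + 1) else idxsFrom w xs (k + 1)

theorem idxsFrom_ge (w : String) (ys : List String) (k : Nat) :
    ∀ m ∈ idxsFrom w ys k, (k : Int) ≤ m := by
  induction ys generalizing k with
  | nil => simp [idxsFrom]
  | cons x xs ih =>
    intro m hm
    simp only [idxsFrom] at hm
    split at hm
    · rw [List.mem_cons] at hm
      rcases hm with h | h
      · omega
      · have := ih (k + 1) m h; push_cast at this ⊢; omega

    · have := ih (k + 1) m hm; push_cast at this ⊢; omega

theorem pvIndexFromAux_none (w : String) (ys : List String) (k : Nat)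
    (h : pvIndexFromAux w ys k = none) : idxsFrom w ys k = [] := by
  induction ys generalizing k with
  | nil => simp [idxsFrom]
  | cons x xs ih =>
    simp only [pvIndexFromAux] at h
    split at h
    · cases h
    · simp only [idxsFrom]
      rw [if_neg (by assumption)]
      exact ih (k + 1) h

theorem pvIndexFromAux_some (w : String) (ys : List String) (k i : Nat)
    (h : pvIndexFromAux w ys k = some i) :
    idxsFrom w ys k = (i : Int) :: idxsFrom w (ys.drop (i + 1 - k)) (i + 1) := by
  induction ys generalizing k with
  | nil => simp [pvIndexFromAux] at h
  | cons x xs ih =>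
    simp only [pvIndexFromAux] at h
    split at h
    · cases h
      simp only [idxsFrom]
      rw [if_pos (by assumption)]
      simp
    · have hb := pvIndexFromAux_bounds w xs (k + 1) i h
      simp only [idxsFrom]
      rw [if_neg (by assumption)]
      rw [ih (k + 1) h]
      have h1 : i + 1 - k = (i - (k + 1)) + 1 + 1 := by omega
      have h2 : i + 1 - (k + 1) = (i - (k + 1)) + 1 := by omega
      rw [h1, h2, List.drop_succ_cons]

theorem gwilLoop_eq (w : String) (xs : List String) (b : Nat) :
    gwilLoop w xs b = idxsFrom w (xs.drop b) b := by
  rw [gwilLoop]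
  split
  · rename_i h
    exact (pvIndexFromAux_none w (xs.drop b) b h).symm
  · rename_i i h
    have hb := pvIndexFrom_bounds w xs b i h
    rw [gwilLoop_eq w xs (i + 1)]
    rw [pvIndexFromAux_some w (xs.drop b) b i h]
    rw [List.drop_drop]
    have : b + (i + 1 - b) = i + 1 := by omega
    rw [this]
termination_by xs.length - b
decreasing_by omega

-- mrg skips a j-entry smaller than every remaining i-entry
theorem mrg_skip (I : List Int) (k : Int) (J : List Int)
    (h : ∀ m ∈ I, k < m) : mrg I (k :: J) = mrg I J := by
  match I, J with
  | [], [] => simp [mrg]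
  | [], _ :: _ => simp [mrg]
  | i :: is, J =>
    rw [mrg]
    rw [if_pos (h i (by simp))]

theorem mrg_nil (I : List Int) : mrg I [] = (0, 0, 0) := by
  cases I <;> simp [mrg]

-- pending flush against the next j (or nothing if no j remains)
def pspec (pc ps : Int) (I J : List Int) : Int × Int × Int :=
  match J with
  | [] => (0, 0, 0)
  | j :: _ => add3 (pc, pc * j - ps, pc) (mrg I J)

theorem pspec_zero (I J : List Int) : pspec 0 0 I J = mrg I J := by
  cases J with
  | nil => rw [mrg_nil]; rfl
  | cons j js => simp [pspec, add3]

-- the main B invariant: one pass over the suffix equals acc + pending-flush + merge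
theorem bloop_spec (wi wj : String) (ws : List String) (k : Nat) (f d c pc ps : Int) :
    bloop wi wj ws (k : Int) f d c pc ps
      = add3 (f, d, c) (pspec pc ps (idxsFrom wi ws k) (idxsFrom wj ws k)) := by
  induction ws generalizing k f d c pc ps with
  | nil => simp [bloop, idxsFrom, pspec, add3]
  | cons w rest ih =>
    have hI := idxsFrom_ge wi rest (k + 1)
    have hJ := idxsFrom_ge wj rest (k + 1)
    simp only [bloop, idxsFrom]
    by_cases hwj : w = wj
    · rw [if_pos hwj]
      rw [show ((k : Int) + 1) = ((k + 1 : Nat) : Int) by push_cast; ring]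
      rw [ih]
      rw [if_pos hwj, pspec_zero]
      by_cases hwi : w = wi
      · rw [if_pos hwi, if_pos hwi, if_pos hwi]
        have hskip : mrg (idxsFrom wi rest (k + 1)) ((k : Int) :: idxsFrom wj rest (k + 1))
            = mrg (idxsFrom wi rest (k + 1)) (idxsFrom wj rest (k + 1)) := by
          apply mrg_skip
          intro m hm; have := hI m hm; push_cast at this; omega
        simp only [pspec, mrg]
        rw [if_neg (by omega), hskip]
        cases hm : mrg (idxsFrom wi rest (k + 1)) (idxsFrom wj rest (k + 1)) with
        | mk a bc =>
          simp [add3]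
          constructor
          · ring
          constructor
          · ring
          · ring
      · rw [if_neg hwi, if_neg hwi, if_neg hwi]
        have hskip : mrg (idxsFrom wi rest (k + 1)) ((k : Int) :: idxsFrom wj rest (k + 1))
            = mrg (idxsFrom wi rest (k + 1)) (idxsFrom wj rest (k + 1)) := by
          apply mrg_skip
          intro m hm; have := hI m hm; push_cast at this; omega
        simp only [pspec]
        rw [hskip]
        cases hm : mrg (idxsFrom wi rest (k + 1)) (idxsFrom wj rest (k + 1)) with
        | mk a bc => simp [add3]; refine ⟨by ring, by ring, by ring⟩
    · rw [if_neg hwj, if_neg hwj]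
      rw [show ((k : Int) + 1) = ((k + 1 : Nat) : Int) by push_cast; ring]
      rw [ih]
      by_cases hwi : w = wi
      · rw [if_pos hwi, if_pos hwi, if_pos hwi]
        congr 1
        -- pspec pc ps (k :: I') J' = pspec (pc+1) (ps+k) I' J'
        cases hJ' : idxsFrom wj rest (k + 1) with
        | nil => simp [pspec]
        | cons j0 js =>
          have hj0 : (k : Int) < j0 := by
            have := hJ j0 (by rw [hJ']; simp); push_cast at this; omega
          simp only [pspec, mrg]
          rw [if_neg (by omega)]
          cases hm : mrg (idxsFrom wi rest (k + 1)) (j0 :: js) with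
          | mk a bc => simp [add3]; refine ⟨by ring, by ring, by ring⟩
      · rw [if_neg hwi, if_neg hwi, if_neg hwi]
  
-- the A merge loop equals acc + mrg of the remaining suffixes
theorem amerge_spec (I J : List Int) (f d c : Int) (ii jj : Nat) :
    amerge I J f d c ii jj = add3 (f, d, c) (mrg (I.drop ii) (J.drop jj)) := by
  rw [amerge]
  split
  · rename_i h
    obtain ⟨hi, hj⟩ := h
    have hgi : I.getD ii 0 = I[ii] := List.getD_eq_getElem I 0 hi
    have hgj : J.getD jj 0 = J[jj] := List.getD_eq_getElem J 0 hj
    rw [hgi, hgj]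
    rw [List.drop_eq_getElem_cons hi, List.drop_eq_getElem_cons hj]
    split
    · rename_i hgt
      rw [amerge_spec I J f d c ii (jj + 1)]
      rw [mrg, if_pos hgt]
      rw [← List.drop_eq_getElem_cons hi]
    · rename_i hle
      rw [amerge_spec I J (f + 1) (d + (J[jj] - I[ii])) (c + 1) (ii + 1) jj]
      rw [mrg, if_neg hle]
      rw [← List.drop_eq_getElem_cons hj]
      cases hm : mrg (I.drop (ii + 1)) (J.drop jj) with
      | mk a bc =>
        simp only [add3, Prod.mk.injEq]
        refine ⟨by ring, by ring, by ring⟩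
  · rename_i h
    have h1 : I.length ≤ ii ∨ J.length ≤ jj := by omega
    rcases h1 with h1 | h1
    · rw [List.drop_eq_nil_of_le h1]
      cases hd : J.drop jj with
      | nil => simp [mrg, add3]
      | cons a as => simp [mrg, add3]
    · rw [List.drop_eq_nil_of_le h1, mrg_nil]
      simp [add3]
termination_by (I.length - ii) + (J.length - jj)
decreasing_by all_goals omega

-- ===== VERDICT (by name: the statement is the Claim_ definition above) =====
theorem get_ij_frequency_and_dist_from_word_list_spec : Claim_equal_get_ij_frequency_and_dist_from_word_list := by
  intro word_i word_j word_list min_dis _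
  unfold Spec_get_ij_frequency_and_dist_from_word_list
  unfold get_ij_frequency_and_dist_from_word_list get_ij_frequency_and_dist_from_word_list_alt
  unfold get_word_index_list
  have hb := bloop_spec word_i word_j word_list 0 0 0 0 0 0
  simp only [Nat.cast_zero] at hb
  rw [gwilLoop_eq, gwilLoop_eq]
  simp only [List.drop_zero]
  rw [hb, pspec_zero]
  by_cases h : idxsFrom word_i word_list 0 = [] ∨ idxsFrom word_j word_list 0 = []
  · rw [if_pos h]
    rcases h with h | h
    · rw [h]
      cases idxsFrom word_j word_list 0 <;> simp [mrg, add3]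
    · rw [h, mrg_nil]
      simp [add3]
  · rw [if_neg h]
    rw [amerge_spec]
    simp [add3]
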